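-- pv_equiv track=rewrite | github.com/shuyhere/LLMs-for-Scalable-Deliberation | datasets/seed_data/data_processing.py | find_question_column
-- ===== SOURCE A (Python) =====
-- from typing import Dict, List, Optional
--
-- def find_question_column(headers: List[str]) -> Optional[str]:
--     """Return the header that contains the question prompt.
--
--     Heuristics:
--     - Prefer a column that ends with "(text)" as exported by Deliberation.io.
--     - Fallback to a column that contains a question mark and is not a known administrative field.
--     - If none found, return None.
--     """
--     # Prefer explicit question text column
--     for header in headers:
--         if header.strip().endswith("(text)"):
--             return header
--
--     # Fallback: any header with a question mark that isn't obviously metadata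
--     admin_like = {
--         "ID",
--         "Session ID",
--         "Vote",
--         "Opinion Text",
--         "Submitted At",
--         "Is Flagged",
--         "Flagged By",
--         "Flagged At",
--         "Flag Reason",
--         "Access Type",
--         "Group/Participant Name",
--         "Participation Code",
--         "Access Granted At",
--         "Participation URL",
--         "Page Visit Timestamps",
--         "Module Status",
--         "Full Response Metadata (JSON)",
--     }
--     for header in headers:
--         if header in admin_like:
--             continue
--         if "?" in header:
--             return header
--
--     return None
-- ===== SOURCE B (Python) =====
-- ADMIN_LIKE = {
--     "ID", "Session ID", "Vote", "Opinion Text", "Submitted At", "Is Flagged",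
--     "Flagged By", "Flagged At", "Flag Reason", "Access Type",
--     "Group/Participant Name", "Participation Code", "Access Granted At",
--     "Participation URL", "Page Visit Timestamps", "Module Status",
--     "Full Response Metadata (JSON)",
-- }
--
-- def find_question_column(headers):
--     """Single pass: return first '(text)' header immediately; remember the
--     first non-admin header containing '?' as a fallback, returned at the end."""
--     fallback = None
--     for header in headers:
--         if header.strip().endswith("(text)"):
--             return header
--         if fallback is None and header not in ADMIN_LIKE and "?" in header:
--             fallback = header
--     return fallback
-- ===== Notes on version B (the rewrite author's own statement) =====
-- stated objective: simpler
-- what changed: Replaced A's two sequential scans (one for a '(text)' header, one for a '?' fallback) by a single pass that returns a '(text)' header immediately and remembers the first non-admin '?' header in a nullable fallback returned after the loop.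
import Mathlib
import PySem

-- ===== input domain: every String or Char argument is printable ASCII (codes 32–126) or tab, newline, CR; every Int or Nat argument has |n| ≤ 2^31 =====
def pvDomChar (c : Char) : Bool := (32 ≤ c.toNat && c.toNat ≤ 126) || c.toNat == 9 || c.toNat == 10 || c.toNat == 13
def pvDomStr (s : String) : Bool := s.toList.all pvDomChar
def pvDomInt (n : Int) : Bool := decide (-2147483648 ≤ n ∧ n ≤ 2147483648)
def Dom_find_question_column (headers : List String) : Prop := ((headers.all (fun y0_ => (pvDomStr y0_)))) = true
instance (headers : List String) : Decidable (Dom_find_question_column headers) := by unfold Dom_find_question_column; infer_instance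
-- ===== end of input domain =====

-- B folds A's two scans into one pass keeping a nullable fallback (objective: simpler, same cost).
-- ===== PORT A =====
def adminLike : PySem.Set String := PySem.Set.ofList
  ["ID", "Session ID", "Vote", "Opinion Text", "Submitted At", "Is Flagged",
   "Flagged By", "Flagged At", "Flag Reason", "Access Type",
   "Group/Participant Name", "Participation Code", "Access Granted At",
   "Participation URL", "Page Visit Timestamps", "Module Status",
   "Full Response Metadata (JSON)"]

-- first loop of A: return first header whose strip() ends with "(text)"
def fqcLoop1 : List String → Option String
  | [] => none
  | h :: t => if PySem.Str.endswith (PySem.Str.strip h) "(text)" then some h else fqcLoop1 t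

-- second loop of A: skip admin-like headers, return first with a '?'
def fqcLoop2 : List String → Option String
  | [] => none
  | h :: t =>
    if PySem.Set.contains adminLike h then fqcLoop2 t
    else if PySem.Str.isIn "?" h then some h
    else fqcLoop2 t

def find_question_column (headers : List String) : Option String :=
  match fqcLoop1 headers with
  | some h => some h
  | none => fqcLoop2 headers

-- ===== PORT B =====
-- single loop with a nullable fallback accumulator
def fqcAltLoop : List String → Option String → Option String
  | [], fallback => fallback
  | h :: t, fallback =>
    if PySem.Str.endswith (PySem.Str.strip h) "(text)" then some h
    else if fallback.isNone && !(PySem.Set.contains adminLike h) && PySem.Str.isIn "?" h then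
      fqcAltLoop t (some h)
    else fqcAltLoop t fallback

def find_question_column_alt (headers : List String) : Option String :=
  fqcAltLoop headers none

-- ===== PRECONDITION & SPEC =====
def Spec_find_question_column (headers : List String) (out : Option String) : Prop := out = find_question_column_alt headers
instance (headers : List String) (out : Option String) : Decidable (Spec_find_question_column headers out) := by unfold Spec_find_question_column; infer_instance

-- ===== CLAIM (what is proved, stated in full; the proofs are below) =====
def Claim_equal_find_question_column : Prop := ∀ (headers : List String), Dom_find_question_column headers → Spec_find_question_column headers (find_question_column headers)

-- ===== LEMMAS AND PROOFS =====

-- ===== VERDICT (by name: the statement is the Claim_ definition above) =====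
lemma fqcAltLoop_eq (t : List String) (fb : Option String) :
    fqcAltLoop t fb =
      match fqcLoop1 t with
      | some h => some h
      | none => fb.orElse (fun _ => fqcLoop2 t) := by
  induction t generalizing fb with
  | nil => cases fb <;> simp [fqcAltLoop, fqcLoop1, fqcLoop2, Option.orElse]
  | cons h t ih =>
    simp only [fqcAltLoop, fqcLoop1, fqcLoop2]
    split_ifs with h1 h2 <;> simp_all [Option.orElse] <;> cases fb <;> simp_all

theorem find_question_column_spec : Claim_equal_find_question_column := by
  intro headers _
  unfold Spec_find_question_column find_question_column find_question_column_alt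
  rw [fqcAltLoop_eq]
  cases fqcLoop1 headers <;> simp [Option.orElse]
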